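-- pv_equiv track=rewrite | github.com/nhdewitt/codewars-kata | 6 kyu/coding_meetup_8_higher_order_functions_series_will_all_continents_be_represented.py | all_continents
-- ===== SOURCE A (Python) =====
-- def all_continents(lst):
--     continents = {
--         "Africa": 0,
--         "Americas": 0,
--         "Asia": 0,
--         "Europe": 0,
--         "Oceania": 0
--     }
--
--     for l in lst:
--         continents[l['continent']] = continents.setdefault(l['continent'], 0) + 1
--
--     return all(continents.values()) > 0
-- ===== SOURCE B (Python) =====
-- REQUIRED = ("Africa", "Americas", "Asia", "Europe", "Oceania")
--
-- def all_continents(lst):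
--     for continent in REQUIRED:
--         found = False
--         for item in lst:
--             if item['continent'] == continent:
--                 found = True
--                 break
--         if not found:
--             return False
--     return True
-- ===== Notes on version B (the rewrite author's own statement) =====
-- stated objective: simpler
-- what changed: B drops A's counting dict entirely: instead of one pass maintaining five counters and then all(values), it runs one early-exiting search per required continent (five staged scans with break / early return False), keeping no data structure at all.
import Mathlib
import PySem

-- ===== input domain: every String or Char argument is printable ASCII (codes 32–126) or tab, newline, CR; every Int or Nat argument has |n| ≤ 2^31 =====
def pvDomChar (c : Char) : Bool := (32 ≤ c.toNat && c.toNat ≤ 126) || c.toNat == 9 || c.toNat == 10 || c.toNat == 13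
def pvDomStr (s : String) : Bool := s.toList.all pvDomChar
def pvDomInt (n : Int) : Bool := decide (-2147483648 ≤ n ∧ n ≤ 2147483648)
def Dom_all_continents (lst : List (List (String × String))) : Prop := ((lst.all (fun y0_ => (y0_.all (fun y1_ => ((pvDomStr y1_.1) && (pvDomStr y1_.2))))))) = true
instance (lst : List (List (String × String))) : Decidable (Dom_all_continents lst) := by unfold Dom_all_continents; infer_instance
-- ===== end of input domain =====

-- B drops A's counting dict: one early-exiting search per required continent (five staged
-- scans with break/early return) instead of one pass over five counters plus all(values).


-- ===== PORT A =====
-- for l in lst: continents[l['continent']] = continents.setdefault(l['continent'], 0) + 1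
-- (fold state is Option: none = the KeyError Python raises when an item has no 'continent' key)
def all_continents (lst : List (List (String × String))) : Bool :=
  let init : PySem.Dict String Int :=
    PySem.Dict.ofList [("Africa", 0), ("Americas", 0), ("Asia", 0), ("Europe", 0), ("Oceania", 0)]
  let st := lst.foldl (fun acc l =>
      acc.bind (fun d => ((PySem.Dict.mk l).get? "continent").map (fun c =>
        let d1 := d.setdefault c 0
        d1.insert c ((d1.get? c).getD 0 + 1)))) (some init)
  match st with
  | none => false  -- unreachable under Pre_ (Python raises KeyError here)
  | some d => d.values.all (fun v => decide (v ≠ 0))  -- all(d.values()) > 0, and True > 0 ↔ True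

-- ===== PORT B =====
-- inner loop: 'for item in lst: if item['continent'] == continent: found = True; break'
-- (none = KeyError reached before a match; break = returning at the first match)
def pvScanB (continent : String) : List (List (String × String)) → Option Bool
  | [] => some false
  | l :: rest => ((PySem.Dict.mk l).get? "continent").bind (fun k =>
      if k == continent then some true else pvScanB continent rest)

-- outer loop: 'for continent in REQUIRED: … if not found: return False' / 'return True'
def pvOuterB (lst : List (List (String × String))) : List String → Option Bool
  | [] => some true
  | c :: cs => (pvScanB c lst).bind (fun found =>
      if found then pvOuterB lst cs else some false)

def all_continents_alt (lst : List (List (String × String))) : Bool :=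
  (pvOuterB lst ["Africa", "Americas", "Asia", "Europe", "Oceania"]).getD false
  -- none is unreachable under Pre_ (Python raises KeyError there)

-- ===== PRECONDITION & SPEC =====
-- Pre_ excludes exactly the items without a 'continent' key, on which A raises KeyError.
def Pre_all_continents (lst : List (List (String × String))) : Prop :=
  ∀ l ∈ lst, ((PySem.Dict.mk l).get? "continent").isSome
instance (lst : List (List (String × String))) : Decidable (Pre_all_continents lst) := by
  unfold Pre_all_continents; infer_instance
def pvWitness_all_continents : (List (List (String × String))) :=
  [[("continent", "Africa")], [("continent", "Americas")], [("continent", "Asia")],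
   [("continent", "Europe")], [("continent", "Oceania")]]

def Spec_all_continents (lst : List (List (String × String))) (out : Bool) : Prop := out = all_continents_alt lst
instance (lst : List (List (String × String))) (out : Bool) : Decidable (Spec_all_continents lst out) := by unfold Spec_all_continents; infer_instance

-- ===== CLAIM (what is proved, stated in full; the proofs are below) =====
def Claim_equal_all_continents : Prop := ∀ (lst : List (List (String × String))), Dom_all_continents lst → Pre_all_continents lst → Spec_all_continents lst (all_continents lst)

-- ===== LEMMAS AND PROOFS =====

-- the continent of each item (proof-only; defined under Pre_)
def pvKeys (lst : List (List (String × String))) : List String :=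
  lst.map (fun l => ((PySem.Dict.mk l).get? "continent").getD "")

def pvInit : PySem.Dict String Int :=
  PySem.Dict.ofList [("Africa", 0), ("Americas", 0), ("Asia", 0), ("Europe", 0), ("Oceania", 0)]

-- A's loop body is exactly a counting `modify`
lemma stepA_eq_modify (d : PySem.Dict String Int) (c : String) :
    (let d1 := d.setdefault c 0; d1.insert c ((d1.get? c).getD 0 + 1)) = d.modify c 0 (· + 1) := by
  by_cases h : d.contains c = true
  · rw [PySem.Dict.setdefault_of_contains _ _ h]
    simp only [PySem.Dict.modify, PySem.Dict.getD_eq_get?_getD]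
  · rw [PySem.Dict.setdefault_of_not_contains _ _ (by simpa using h)]
    simp only [PySem.Dict.modify, PySem.Dict.get?_insert_self, PySem.Dict.insert_insert_self,
      Option.getD_some, PySem.Dict.getD_of_not_contains _ _ (by simpa using h : d.contains c = false)]

lemma foldA_eq (lst : List (List (String × String))) (h : Pre_all_continents lst) :
    ∀ d : PySem.Dict String Int,
      lst.foldl (fun acc l =>
        acc.bind (fun d => ((PySem.Dict.mk l).get? "continent").map (fun c =>
          let d1 := d.setdefault c 0
          d1.insert c ((d1.get? c).getD 0 + 1)))) (some d)
      = some ((pvKeys lst).foldl (fun d c => d.modify c 0 (· + 1)) d) := by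
  induction lst with
  | nil => intro d; rfl
  | cons l rest ih =>
    intro d
    obtain ⟨c, hc⟩ := Option.isSome_iff_exists.mp (h l (by simp))
    have hrest : Pre_all_continents rest := fun x hx => h x (by simp [hx])
    simp only [List.foldl_cons, pvKeys, List.map_cons, Option.bind_some, hc, Option.map_some]
    rw [stepA_eq_modify]
    simpa [pvKeys] using ih hrest (d.modify c 0 (· + 1))

-- B's inner scan finds c exactly when c occurs among the items' continents
lemma scanB_eq (c : String) (lst : List (List (String × String))) (h : Pre_all_continents lst) :
    pvScanB c lst = some (decide (c ∈ pvKeys lst)) := by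
  induction lst with
  | nil => rfl
  | cons l rest ih =>
    obtain ⟨k, hk⟩ := Option.isSome_iff_exists.mp (h l (by simp))
    have hrest : Pre_all_continents rest := fun x hx => h x (by simp [hx])
    by_cases hkc : k = c
    · simp [pvScanB, hk, hkc, pvKeys]
    · simp [pvScanB, hk, hkc, pvKeys, ih hrest, Ne.symm hkc]

-- B's outer loop = 'every required name occurs'
lemma outerB_eq (lst : List (List (String × String))) (h : Pre_all_continents lst)
    (cs : List String) :
    pvOuterB lst cs = some (cs.all (fun c => decide (c ∈ pvKeys lst))) := by
  induction cs with
  | nil => rfl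
  | cons c cs ih =>
    by_cases hc : c ∈ pvKeys lst
    · simp [pvOuterB, scanB_eq c lst h, hc, ih]
    · simp [pvOuterB, scanB_eq c lst h, hc]

-- every initial counter is 0 (and the default is 0), so pvInit.getD k 0 = 0 for every k
lemma pvInit_getD (k : String) : pvInit.getD k 0 = 0 := by
  have h : pvInit = PySem.Dict.mk
      [("Africa", 0), ("Americas", 0), ("Asia", 0), ("Europe", 0), ("Oceania", 0)] := by decide
  rw [h]
  simp only [PySem.Dict.getD_eq_get?_getD, PySem.Dict.get?_mk_cons]
  split_ifs <;> simp [PySem.Dict.get?]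

lemma pvInit_keys : pvInit.keys = ["Africa", "Americas", "Asia", "Europe", "Oceania"] := by decide

lemma pvInit_keys_nodup : pvInit.keys.Nodup := by decide

-- the heart of the equivalence: counters-all-nonzero = each of the five names occurs
lemma counts_vs_all (ks : List String) :
    (((ks.foldl (fun d c => d.modify c 0 (· + 1)) pvInit).values).all (fun v => decide (v ≠ 0)))
    = (["Africa", "Americas", "Asia", "Europe", "Oceania"].all (fun c => decide (c ∈ ks))) := by
  have hnd : (ks.foldl (fun d c => d.modify c 0 (· + 1)) pvInit).keys.Nodup := by
    have := PySem.Dict.nodup_keys_foldl_modify_key ks id (0 : Int) (fun _ _ => (· + 1)) pvInit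
      pvInit_keys_nodup
    simpa using this
  rw [PySem.Dict.values_eq_map_keys _ hnd 0, Bool.eq_iff_iff]
  simp only [List.all_map, List.all_eq_true, Function.comp,
    PySem.Dict.getD_foldl_modify_add_one, pvInit_getD, zero_add,
    PySem.Dict.keys_foldl_modify, pvInit_keys, PySem.Set.mem_update, decide_eq_true_eq]
  constructor
  · intro h x hx
    have := h x (Or.inl hx)
    exact List.count_pos_iff.mp (by omega)
  · intro h k hk
    rcases hk with hk | hk
    · have := List.count_pos_iff.mpr (h k hk); omega
    · have := List.count_pos_iff.mpr hk; omega

-- ===== VERDICT (by name: the statement is the Claim_ definition above) =====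
theorem all_continents_spec : Claim_equal_all_continents := by
  intro lst _ hpre
  unfold Spec_all_continents all_continents all_continents_alt
  simp only [foldA_eq lst hpre, outerB_eq lst hpre, Option.getD_some]
  exact counts_vs_all (pvKeys lst)
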